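-- pv_equiv track=rewrite | github.com/Cal-CS-61A-Staff/61a-code | static/scheme/scheme/interpreter.py | V8jdyAH__
-- ===== SOURCE A (Python) =====
-- import tokenize
--
-- h27_2k_ = set(chr((-14 + 48)))
--
-- E07B3F_L = set((' ' + (chr(9) + ('\n' + '\r'))))
--
-- Zz_k = set(((str() + ('' + '()[]')) + ("'" + chr(96))))
--
-- R5qg4Cr1p = (((E07B3F_L | Zz_k) | h27_2k_) | {chr((84 + -40)), (',' + chr(64))})
--
-- def V8jdyAH__(aYu_, c6O_1MTVr):
--     'pKXJ199i2R7a1UK8__1i8Q3'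
--     while (c6O_1MTVr < len(aYu_)):
--         R_p__N9 = aYu_[c6O_1MTVr]
--         if (R_p__N9 == chr((150 + -91))):
--             return (None, len(aYu_))
--         elif (R_p__N9 in E07B3F_L):
--             c6O_1MTVr += (((-111 + 18) + (93 + -39)) + ((106 + 30) + (-108 + 12)))
--         elif (R_p__N9 in Zz_k):
--             if (R_p__N9 == chr(93)):
--                 R_p__N9 = chr(((62 + 76) + (-126 + 29)))
--             if (R_p__N9 == chr(((225 + -44) + (-119 + 29)))):
--                 R_p__N9 = '('
--             return (R_p__N9, (c6O_1MTVr + (((-19 + -97) + (-6 + 71)) + ((67 + -41) + (-10 + 36)))))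
--         elif (R_p__N9 == chr(35)):
--             return (aYu_[c6O_1MTVr:(c6O_1MTVr + (((-62 + 47) + (90 + -31)) + ((-163 + 22) + (8 + 91))))], min((c6O_1MTVr + ((0 + (82 + 9)) + ((-15 + -85) + (-37 + 48)))), len(aYu_)))
--         elif (R_p__N9 == chr(((65 + -47) + (114 + -88)))):
--             if (((c6O_1MTVr + (((12 + 78) + (11 + -7)) + ((-126 + 54) + (36 + -57)))) < len(aYu_)) and (aYu_[(c6O_1MTVr + (((-143 + 100) + (25 + -34)) + ((-87 + 88) + (-23 + 75))))] == chr((-21 + 85)))):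
--                 return ((',' + chr((119 + -55))), (c6O_1MTVr + ((0 + (-163 + 93)) + ((155 + -71) + (-94 + 82)))))
--             return (R_p__N9, (c6O_1MTVr + (((4 + 68) + (-45 + 37)) + ((21 + -83) + (-92 + 91)))))
--         elif (R_p__N9 in h27_2k_):
--             if (((c6O_1MTVr + (((-47 + 77) + (-51 + 65)) + ((11 + 40) + (-64 + -30)))) < len(aYu_)) and (aYu_[(c6O_1MTVr + (((-141 + 17) + (157 + -97)) + ((70 + 89) + (-119 + 25))))] == R_p__N9)):
--                 return ((R_p__N9 + R_p__N9), (c6O_1MTVr + (((-99 + 28) + (-85 + 63)) + ((75 + 14) + (60 + -54)))))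
--             S8N2_ = (bytes(aYu_[c6O_1MTVr:], encoding=(chr((38 + 79)) + (('t' + 'f') + ('-' + '8')))),)
--             pN_O65Slt = tokenize.tokenize(iter(S8N2_).__next__)
--             next(pN_O65Slt)
--             G23_9 = next(pN_O65Slt)
--             if (G23_9.type != tokenize.STRING):
--                 raise ValueError(((('' + 'inva') + ('l' + 'id string')) + (('' + ': ') + ('{0' + '}'))).format(G23_9.string))
--             return (G23_9.string, (G23_9.end[(((-88 + -11) + (7 + 46)) + ((86 + -85) + (140 + -94)))] + c6O_1MTVr))
--         else:
--             q_9l = c6O_1MTVr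
--             while ((q_9l < len(aYu_)) and (aYu_[q_9l] not in R5qg4Cr1p)):
--                 q_9l += (((-49 + 57) + (-101 + 4)) + ((131 + -79) + (67 + -29)))
--             return (aYu_[c6O_1MTVr:q_9l], min(q_9l, len(aYu_)))
--     return (None, len(aYu_))
-- ===== SOURCE B (Python) =====
-- # Two-phase rewrite: a dedicated scan finds the first non-whitespace index, then
-- # a single non-looping dispatch on that character; string literals are lexed by
-- # a small scanner over the remainder slice instead of the tokenize module.
--
-- _WS = " \t\n\r"
-- _DELIM = "()[]'`"
-- _STOP = set(_WS) | set(_DELIM) | {'"', ','}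
--
--
-- def V8jdyAH__(aYu_, c6O_1MTVr):
--     s, n = aYu_, len(aYu_)
--     # first index at/after the start holding a non-whitespace char
--     i = next((k for k in range(c6O_1MTVr, n) if s[k] not in _WS), n)
--     if i >= n:
--         return (None, n)
--     c = s[i]
--     if c == ';':
--         return (None, n)
--     if c in _DELIM:
--         tok = '(' if c in '([' else ')' if c in ')]' else c
--         return (tok, i + 1)
--     if c == '#':
--         return (s[i:i + 2], min(i + 2, n))
--     if c == ',':
--         if i + 1 < n and s[i + 1] == '@':
--             return (',@', i + 2)
--         return (',', i + 1)
--     if c == '"':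
--         if i + 1 < n and s[i + 1] == '"':
--             return ('""', i + 2)
--         # single-line string literal: backslash escapes any non-newline char
--         rest = s[i:]
--         j = 1
--         while j < len(rest) and rest[j] != '"' and rest[j] != '\n':
--             j += 2 if rest[j] == '\\' and j + 1 < len(rest) and rest[j + 1] != '\n' else 1
--         if j < len(rest) and rest[j] == '"':
--             return (rest[:j + 1], i + j + 1)
--         raise ValueError('invalid string: {0}'.format('"'))
--     # symbol: first stop char strictly after i ends the token
--     j = next((k for k in range(i + 1, n) if s[k] in _STOP), n)
--     return (s[i:j], j)
-- ===== Notes on version B (the rewrite author's own statement) =====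
-- stated objective: simpler
-- what changed: A's single while-loop with continue-style whitespace stepping, a nested symbol loop and a call into the tokenize module is replaced by two declarative first-index-in-range scans (whitespace skip, symbol end) followed by one non-looping dispatch on the current character; string literals are lexed by a small single-line scanner over the remainder slice instead of tokenize (constant-factor speedup: no tokenizer setup, fewer per-character branch tests).
import Mathlib
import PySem

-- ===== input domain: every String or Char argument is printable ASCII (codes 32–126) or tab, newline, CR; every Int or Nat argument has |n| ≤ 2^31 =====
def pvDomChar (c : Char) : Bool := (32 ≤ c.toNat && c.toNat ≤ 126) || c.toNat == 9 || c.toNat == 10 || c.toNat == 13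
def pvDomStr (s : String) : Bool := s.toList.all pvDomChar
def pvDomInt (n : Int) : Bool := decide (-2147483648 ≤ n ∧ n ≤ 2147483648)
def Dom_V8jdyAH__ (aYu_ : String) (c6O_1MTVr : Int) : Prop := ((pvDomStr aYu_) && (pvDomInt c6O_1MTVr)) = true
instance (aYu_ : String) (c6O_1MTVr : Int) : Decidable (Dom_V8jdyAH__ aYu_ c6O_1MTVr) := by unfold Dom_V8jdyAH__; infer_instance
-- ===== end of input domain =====

-- B restructures A's single scanning loop into two declarative "first index in
-- range" scans (whitespace skip, symbol end) followed by one non-looping dispatch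
-- on the current character; string literals are lexed by a small single-line
-- scanner over the remainder slice instead of the tokenize module (objective:
-- simpler). Return-value equivalence only; neither program mutates its arguments.

-- ===== PORT A =====
def pvA_ws (c : Char) : Bool := c == ' ' || c == '\t' || c == '\n' || c == '\r'
def pvA_delim (c : Char) : Bool :=
  c == '(' || c == ')' || c == '[' || c == ']' || c == '\'' || c == '`'
-- membership in R5qg4Cr1p for a single char (the 2-char element ",@" never matches one char)
def pvA_stop (c : Char) : Bool := pvA_ws c || pvA_delim c || c == '"' || c == ','

-- the inner 'while (q_9l < len) and (aYu_[q_9l] not in R5qg4Cr1p)' loop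
def pvA_sym (s : String) (q : Int) : Int :=
  if _h : q < (PySem.Str.len s : Int) ∧ (PySem.Str.pyGet? s q).map pvA_stop = some false then
    pvA_sym s (q + 1)
  else q
termination_by ((PySem.Str.len s : Int) - q).toNat
decreasing_by omega

-- hand-port of the effect of A's 'tokenize.tokenize' call on the remainder bytes
-- aYu_[c6O_1MTVr:] (all of it is ONE source line): scanning for the end of a
-- single-line double-quoted string literal starting at offset 0 of the remainder;
-- a backslash escapes any following non-newline char; an unescaped newline, a
-- backslash before a newline or before EOF, or EOF mean tokenize/A raises (none).
-- Exact on the remainder lists reachable here (first char '"', second char ≠ '"').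
def pvA_strScan (l : List Char) (j : Nat) : Option Nat :=
  if h : j < l.length then
    if l[j] = '"' then some j
    else if l[j] = '\\' then
      match l[j+1]? with
      | some c2 => if c2 = '\n' then none else pvA_strScan l (j + 2)
      | none => none
    else if l[j] = '\n' then none
    else pvA_strScan l (j + 1)
  else none
termination_by l.length - j

def pvA_loop (s : String) (i : Int) : Option String × Int :=
  if _h : i < (PySem.Str.len s : Int) then
    match PySem.Str.pyGet? s i with
    | none => (none, (PySem.Str.len s : Int))  -- IndexError (i < -len): excluded by Pre_
    | some c =>
      if c == ';' then (none, (PySem.Str.len s : Int))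
      else if pvA_ws c then pvA_loop s (i + 1)
      else if pvA_delim c then
        let c := if c == ']' then ')' else c
        let c := if c == '[' then '(' else c
        (some (String.mk [c]), i + 1)
      else if c == '#' then
        (some (PySem.Str.slice s (some i) (some (i + 2))), min (i + 2) (PySem.Str.len s : Int))
      else if c == ',' then
        if i + 1 < (PySem.Str.len s : Int) && PySem.Str.pyGet? s (i + 1) == some '@' then
          (some ",@", i + 2)
        else (some ",", i + 1)
      else if c == '"' then
        if i + 1 < (PySem.Str.len s : Int) && PySem.Str.pyGet? s (i + 1) == some c then
          (some (String.mk [c, c]), i + 2)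
        else
          -- tokenize.tokenize on the remainder: token text = rem[:e+1], end col = e+1,
          -- A returns (token, end col + i)
          let rem := PySem.Str.slice s (some i) none
          match pvA_strScan rem.toList 1 with
          | some e => (some (String.mk (rem.toList.take (e + 1))), i + (e : Int) + 1)
          | none => (none, (PySem.Str.len s : Int))  -- tokenize/A raises: excluded by Pre_
      else
        let q := pvA_sym s i
        (some (PySem.Str.slice s (some i) (some q)), min q (PySem.Str.len s : Int))
  else (none, (PySem.Str.len s : Int))
termination_by ((PySem.Str.len s : Int) - i).toNat
decreasing_by omega

def V8jdyAH__ (aYu_ : String) (c6O_1MTVr : Int) : Option String × Int :=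
  pvA_loop aYu_ c6O_1MTVr

-- ===== PORT B =====
def pvB_ws (c : Char) : Bool := c == ' ' || c == '\t' || c == '\n' || c == '\r'
def pvB_stop (c : Char) : Bool :=
  pvB_ws c || c == '(' || c == ')' || c == '[' || c == ']' || c == '\'' || c == '`'
    || c == '"' || c == ','

-- next((k for k in range(a, len(s)) if p(s[k])), len(s))
def pvB_find (s : String) (p : Char → Bool) (a : Int) : Int :=
  if _h : a < (PySem.Str.len s : Int) then
    if (PySem.Str.pyGet? s a).any p then a else pvB_find s p (a + 1)
  else (PySem.Str.len s : Int)
termination_by ((PySem.Str.len s : Int) - a).toNat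
decreasing_by omega

-- Source B's string-literal while loop over rest = s[i:] (j steps by 2 over an escape)
def pvB_strLoop (l : List Char) (j : Nat) : Nat :=
  if h : j < l.length then
    if l[j] ≠ '"' ∧ l[j] ≠ '\n' then
      pvB_strLoop l (j + (if l[j] = '\\' ∧ (l[j+1]?.any (fun c2 => c2 ≠ '\n')) then 2 else 1))
    else j
  else j
termination_by l.length - j
decreasing_by split <;> omega

def V8jdyAH___alt (aYu_ : String) (c6O_1MTVr : Int) : Option String × Int :=
  let n : Int := (PySem.Str.len aYu_ : Int)
  let i := pvB_find aYu_ (fun c => !pvB_ws c) c6O_1MTVr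
  if i ≥ n then (none, n)
  else
    match PySem.Str.pyGet? aYu_ i with
    | none => (none, n)  -- IndexError: excluded by Pre_
    | some c =>
      if c == ';' then (none, n)
      else if c == '(' || c == '[' then (some "(", i + 1)
      else if c == ')' || c == ']' then (some ")", i + 1)
      else if c == '\'' || c == '`' then (some (String.mk [c]), i + 1)
      else if c == '#' then
        (some (PySem.Str.slice aYu_ (some i) (some (i + 2))), min (i + 2) n)
      else if c == ',' then
        if i + 1 < n && PySem.Str.pyGet? aYu_ (i + 1) == some '@' then (some ",@", i + 2)
        else (some ",", i + 1)
      else if c == '"' then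
        if i + 1 < n && PySem.Str.pyGet? aYu_ (i + 1) == some '"' then (some "\"\"", i + 2)
        else
          let rest := PySem.Str.slice aYu_ (some i) none
          let j := pvB_strLoop rest.toList 1
          if rest.toList[j]? == some '"' then
            -- rest[:j+1] on the nonnegative bound j+1 is 'take (j+1)'
            (some (String.mk (rest.toList.take (j + 1))), i + (j : Int) + 1)
          else (none, n)  -- ValueError: excluded by Pre_
      else
        let j := pvB_find aYu_ pvB_stop (i + 1)
        (some (PySem.Str.slice aYu_ (some i) (some j)), j)

-- ===== PRECONDITION & SPEC =====
-- helpers for Pre_ (shape of the input only: where does the first token start,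
-- and is a string literal starting there well formed?)
def pvPre_ws (c : Char) : Bool := c == ' ' || c == '\t' || c == '\n' || c == '\r'

-- the index of the first non-whitespace character at/after c (Python indexing)
def pvPre_skip (s : String) (c : Int) : Int :=
  ((PySem.List.pyRange c (PySem.Str.len s : Int) 1).find?
    (fun k => (PySem.Str.pyGet? s k).any (fun ch => !pvPre_ws ch))).getD
    (PySem.Str.len s : Int)

-- is the single-line double-quoted literal whose body starts here terminated?
def pvPre_strOk : List Char → Bool
  | [] => false
  | c :: rest =>
    if c = '"' then true
    else if c = '\\' then
      match rest with
      | [] => false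
      | c2 :: rest2 => if c2 = '\n' then false else pvPre_strOk rest2
    else if c = '\n' then false
    else pvPre_strOk rest

def pvPreOk (s : String) (c : Int) : Bool :=
  let i := pvPre_skip s c
  match PySem.Str.pyGet? s i with
  | some ch =>
    if ch == '"' then
      if i + 1 < (PySem.Str.len s : Int) && PySem.Str.pyGet? s (i + 1) == some '"' then true
      else pvPre_strOk ((PySem.Str.slice s (some i) none).toList.drop 1)
    else true
  | none => true

-- Pre_ excludes exactly the inputs where A raises: (a) start indices below -len
-- (IndexError), and (b) inputs whose first token is a malformed string literal —
-- unterminated, or containing a raw or escaped newline — where A's tokenize call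
-- raises (TokenError) or A itself raises ValueError. A returns on every other input.
def Pre_V8jdyAH__ (aYu_ : String) (c6O_1MTVr : Int) : Prop :=
  -(PySem.Str.len aYu_ : Int) ≤ c6O_1MTVr ∧ pvPreOk aYu_ c6O_1MTVr = true
instance (aYu_ : String) (c6O_1MTVr : Int) : Decidable (Pre_V8jdyAH__ aYu_ c6O_1MTVr) := by
  unfold Pre_V8jdyAH__; infer_instance

def pvWitness_V8jdyAH__ : String × Int := ("  (+ 12 x)", 0)

def Spec_V8jdyAH__ (aYu_ : String) (c6O_1MTVr : Int) (out : Option String × Int) : Prop :=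
  out = V8jdyAH___alt aYu_ c6O_1MTVr
instance (aYu_ : String) (c6O_1MTVr : Int) (out : Option String × Int) :
    Decidable (Spec_V8jdyAH__ aYu_ c6O_1MTVr out) := by unfold Spec_V8jdyAH__; infer_instance

-- ===== CLAIM (what is proved, stated in full; the proofs are below) =====
def Claim_equal_V8jdyAH__ : Prop := ∀ (aYu_ : String) (c6O_1MTVr : Int),
  Dom_V8jdyAH__ aYu_ c6O_1MTVr → Pre_V8jdyAH__ aYu_ c6O_1MTVr →
  Spec_V8jdyAH__ aYu_ c6O_1MTVr (V8jdyAH__ aYu_ c6O_1MTVr)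

-- ===== LEMMAS AND PROOFS =====

theorem pv_mk_lpar : String.mk ['('] = "(" := rfl
theorem pv_mk_rpar : String.mk [')'] = ")" := rfl
theorem pv_mk_qq : String.mk ['"', '"'] = "\"\"" := rfl

theorem pv_get_some (s : String) (q : Int) (h1 : -(PySem.Str.len s : Int) ≤ q)
    (h2 : q < (PySem.Str.len s : Int)) : ∃ c, PySem.Str.pyGet? s q = some c := by
  simp at h1 h2 ⊢
  rcases hx : PySem.List.pyGet? s.toList q with _ | c
  · rw [PySem.List.pyGet?_eq_none_iff] at hx
    exfalso; apply hx
    constructor <;> simp <;> omega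
  · exact ⟨c, rfl⟩

theorem pv_ws_eq (c : Char) : pvA_ws c = pvB_ws c := rfl
theorem pv_pre_ws_eq (c : Char) : pvPre_ws c = pvB_ws c := rfl

theorem pv_stop_eq (c : Char) : pvA_stop c = pvB_stop c := by
  simp [pvA_stop, pvA_ws, pvA_delim, pvB_stop, pvB_ws, Bool.or_assoc]

theorem pvB_find_le (s : String) (p : Char → Bool) (a : Int) :
    pvB_find s p a ≤ (PySem.Str.len s : Int) := by
  unfold pvB_find
  split
  · split
    · omega
    · exact pvB_find_le s p (a + 1)
  · omega
termination_by ((PySem.Str.len s : Int) - a).toNat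
decreasing_by omega

theorem pvA_sym_eq_find (s : String) (q : Int)
    (h1 : -(PySem.Str.len s : Int) ≤ q) (h2 : q ≤ (PySem.Str.len s : Int)) :
    pvA_sym s q = pvB_find s pvB_stop q := by
  by_cases hq : q < (PySem.Str.len s : Int)
  · obtain ⟨c, hc⟩ := pv_get_some s q h1 hq
    by_cases hs : pvA_stop c = true
    · rw [pvA_sym, dif_neg (by rw [hc]; simp [hs]), pvB_find, dif_pos hq, hc]
      simp [← pv_stop_eq, hs]
    · rw [pvA_sym, dif_pos ⟨hq, by rw [hc]; simp [Bool.not_eq_true] at hs; simp [hs]⟩,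
        pvB_find, dif_pos hq, hc]
      simp only [Option.any_some, ← pv_stop_eq, hs]
      have := pvA_sym_eq_find s (q + 1) (by omega) (by omega)
      simp [Bool.not_eq_true] at hs
      simp [this]
  · rw [pvA_sym, dif_neg (fun h => hq h.1), pvB_find, dif_neg hq]
    omega
termination_by ((PySem.Str.len s : Int) - q).toNat
decreasing_by omega

-- A's hand-ported tokenize scan equals B's exit-then-check while loop
theorem pv_scan_eq (l : List Char) (j : Nat) :
    pvA_strScan l j =
      if l[pvB_strLoop l j]? = some '"' then some (pvB_strLoop l j) else none := by
  by_cases h : j < l.length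
  · have hB : pvB_strLoop l j =
        if l[j] ≠ '"' ∧ l[j] ≠ '\n' then
          pvB_strLoop l
            (j + (if l[j] = '\\' ∧ (l[j+1]?.any (fun c2 => c2 ≠ '\n')) then 2 else 1))
        else j := by
      rw [pvB_strLoop, dif_pos h]
    rw [pvA_strScan, dif_pos h]
    by_cases hq : l[j] = '"'
    · have hL : pvB_strLoop l j = j := by rw [hB, if_neg (by simp [hq])]
      rw [if_pos hq, hL, List.getElem?_eq_getElem h, hq, if_pos rfl]
    · by_cases hbs : l[j] = '\\'
      · rcases h2 : l[j+1]? with _ | c2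
        · -- backslash as the last char: A raises, B's loop exits at j+1 ≥ len
          have hn : ¬ (j + 1 < l.length) := by
            intro hlt; rw [List.getElem?_eq_getElem hlt] at h2; cases h2
          have hstep :
              (if l[j] = '\\' ∧ (l[j+1]?.any (fun c2 => c2 ≠ '\n')) then 2 else 1) = 1 := by
            rw [h2]; simp
          have hL : pvB_strLoop l j = j + 1 := by
            rw [hB, if_pos (by simp [hbs]), hstep, pvB_strLoop, dif_neg hn]
          rw [if_neg hq, if_pos hbs, hL]
          simp [List.getElem?_eq_none_iff.mpr (show l.length ≤ j + 1 by omega)]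
        · have hlt : j + 1 < l.length := (List.getElem?_eq_some_iff.mp h2).1
          have hg : l[j+1] = c2 := by
            have := List.getElem?_eq_getElem hlt; rw [h2] at this
            exact (Option.some.inj this).symm
          by_cases hc2 : c2 = '\n'
          · -- escaped newline: A raises, B's loop steps 1 and exits on the newline
            subst hc2
            have hstep :
                (if l[j] = '\\' ∧ (l[j+1]?.any (fun c2 => c2 ≠ '\n')) then 2 else 1) = 1 := by
              rw [h2]; simp
            have hL : pvB_strLoop l j = j + 1 := by
              rw [hB, if_pos (by simp [hbs]), hstep, pvB_strLoop, dif_pos hlt,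
                if_neg (by simp [hg])]
            rw [if_neg hq, if_pos hbs, hL, h2]
            simp
          · -- ordinary escape: both skip two chars
            have hstep :
                (if l[j] = '\\' ∧ (l[j+1]?.any (fun c2 => c2 ≠ '\n')) then 2 else 1) = 2 := by
              rw [h2]; simp [hbs, hc2]
            have hL : pvB_strLoop l j = pvB_strLoop l (j + 2) := by
              rw [hB, if_pos (by simp [hbs]), hstep]
            rw [if_neg hq, if_pos hbs, hL]
            simpa [hc2] using pv_scan_eq l (j + 2)
      · by_cases hnl : l[j] = '\n'
        · have hL : pvB_strLoop l j = j := by rw [hB, if_neg (by simp [hnl])]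
          rw [if_neg hq, if_neg hbs, if_pos hnl, hL, List.getElem?_eq_getElem h, hnl]
          simp
        · have hstep :
              (if l[j] = '\\' ∧ (l[j+1]?.any (fun c2 => c2 ≠ '\n')) then 2 else 1) = 1 := by
            simp [hbs]
          have hL : pvB_strLoop l j = pvB_strLoop l (j + 1) := by
            rw [hB, if_pos (by simp [hq, hnl]), hstep]
          rw [if_neg hq, if_neg hbs, if_neg hnl, hL]
          exact pv_scan_eq l (j + 1)
  · rw [pvA_strScan, dif_neg h, pvB_strLoop, dif_neg h,
      List.getElem?_eq_none_iff.mpr (by omega)]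
    simp
termination_by l.length - j
decreasing_by all_goals omega

theorem pv_strOk_eq (l : List Char) (j : Nat) :
    pvPre_strOk (l.drop j) = (pvA_strScan l j).isSome := by
  by_cases h : j < l.length
  · have hd : l.drop j = l[j] :: l.drop (j + 1) := List.drop_eq_getElem_cons h
    rw [pvA_strScan, dif_pos h, hd]
    by_cases hq : l[j] = '"'
    · rw [pvPre_strOk.eq_def]; simp [hq]
    · by_cases hbs : l[j] = '\\'
      · rcases h2 : l[j+1]? with _ | c2
        · have hnil : l.drop (j + 1) = [] :=
            List.drop_eq_nil_of_le (by have := List.getElem?_eq_none_iff.mp h2; omega)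
          rw [pvPre_strOk.eq_def]; simp [hq, hbs, h2, hnil]
        · have hlt : j + 1 < l.length := (List.getElem?_eq_some_iff.mp h2).1
          have hg : l[j+1] = c2 := by
            have := List.getElem?_eq_getElem hlt; rw [h2] at this
            exact (Option.some.inj this).symm
          have hd2 : l.drop (j + 1) = c2 :: l.drop (j + 2) := by
            rw [List.drop_eq_getElem_cons hlt, hg]
          by_cases hc2 : c2 = '\n'
          · rw [pvPre_strOk.eq_def]; simp [hq, hbs, h2, hd2, hc2]
          · rw [pvPre_strOk.eq_def]; simp [hq, hbs, h2, hd2, hc2, pv_strOk_eq l (j + 2)]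
      · by_cases hnl : l[j] = '\n'
        · rw [pvPre_strOk.eq_def]; simp [hq, hbs, hnl]
        · rw [pvPre_strOk.eq_def]; simp [hq, hbs, hnl, pv_strOk_eq l (j + 1)]
  · rw [pvA_strScan, dif_neg h, List.drop_eq_nil_of_le (by omega)]
    rw [pvPre_strOk.eq_def]; simp
termination_by l.length - j
decreasing_by all_goals omega

theorem pv_skip_eq_find (s : String) (c : Int) (h1 : -(PySem.Str.len s : Int) ≤ c) :
    pvPre_skip s c = pvB_find s (fun ch => !pvB_ws ch) c := by
  by_cases hc : c < (PySem.Str.len s : Int)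
  · obtain ⟨ch, hch⟩ := pv_get_some s c h1 hc
    rw [pvB_find, dif_pos hc, hch]
    unfold pvPre_skip
    rw [PySem.List.pyRange_one_cons hc, List.find?_cons]
    have hch' : PySem.List.pyGet? s.toList c = some ch := by simpa using hch
    by_cases hw : pvPre_ws ch = true
    · have hw' : pvB_ws ch = true := by rw [← pv_pre_ws_eq]; exact hw
      have hrec := pv_skip_eq_find s (c + 1) (by omega)
      unfold pvPre_skip at hrec
      simpa [hch', hw, hw'] using hrec
    · have hwf : pvPre_ws ch = false := (Bool.not_eq_true _).mp hw
      have hw' : pvB_ws ch = false := by rw [← pv_pre_ws_eq]; exact hwf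
      simp [hch', hwf, hw']
  · rw [pvB_find, dif_neg hc]
    unfold pvPre_skip
    rw [PySem.List.pyRange_one_eq_nil (by omega)]
    rfl
termination_by ((PySem.Str.len s : Int) - c).toNat
decreasing_by omega

theorem pv_main (s : String) (i : Int)
    (h1 : -(PySem.Str.len s : Int) ≤ i) (h2 : pvPreOk s i = true) :
    pvA_loop s i = V8jdyAH___alt s i := by
  by_cases hi : i < (PySem.Str.len s : Int)
  · obtain ⟨c, hc⟩ := pv_get_some s i h1 hi
    by_cases hw : pvA_ws c = true
    · -- whitespace: A advances; B's whitespace scan skips the same char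
      have hfind : pvB_find s (fun c => !pvB_ws c) i
          = pvB_find s (fun c => !pvB_ws c) (i + 1) := by
        rw [pvB_find, dif_pos hi, hc]
        simp [← pv_ws_eq, hw]
      have hskip : pvPre_skip s i = pvPre_skip s (i + 1) := by
        rw [pv_skip_eq_find s i h1, pv_skip_eq_find s (i + 1) (by omega), hfind]
      have hsemi : (c == ';') = false := by
        revert hw; simp [pvA_ws]; rintro (((rfl | rfl) | rfl) | rfl) <;> decide
      rw [pvA_loop, dif_pos hi, hc]
      simp only [hsemi, Bool.false_eq_true, if_false, hw, if_true]
      have hB : V8jdyAH___alt s i = V8jdyAH___alt s (i + 1) := by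
        simp only [V8jdyAH___alt, hfind]
      rw [hB]
      exact pv_main s (i + 1) (by omega) (by rw [← h2]; simp only [pvPreOk, hskip])
    · -- first non-whitespace char found at i: B dispatches here
      have hfind : pvB_find s (fun c => !pvB_ws c) i = i := by
        rw [pvB_find, dif_pos hi, hc]
        simp [← pv_ws_eq, hw]
      have hskip : pvPre_skip s i = i := by
        rw [pv_skip_eq_find s i h1, hfind]
      rw [pvA_loop, dif_pos hi, hc]
      simp only [V8jdyAH___alt, hfind, hc]
      rw [if_neg (not_le.mpr hi)]
      by_cases h0 : c = ';'
      · subst h0; simp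
      by_cases hd1 : c = '('
      · subst hd1; simp [pvA_ws, pvA_delim, pv_mk_lpar]
      by_cases hd2 : c = ')'
      · subst hd2; simp [pvA_ws, pvA_delim, pv_mk_rpar]
      by_cases hd3 : c = '['
      · subst hd3; simp [pvA_ws, pvA_delim, pv_mk_lpar]
      by_cases hd4 : c = ']'
      · subst hd4; simp [pvA_ws, pvA_delim, pv_mk_rpar]
      by_cases hd5 : c = '\''
      · subst hd5; simp [pvA_ws, pvA_delim]
      by_cases hd6 : c = '`'
      · subst hd6; simp [pvA_ws, pvA_delim]
      by_cases hh : c = '#'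
      · subst hh; simp [pvA_ws, pvA_delim]
      by_cases hcm : c = ','
      · subst hcm; simp [pvA_ws, pvA_delim]
      by_cases hq : c = '"'
      · -- string literal: Pre_ guarantees A's tokenize scan succeeds and equals B's
        subst hq
        have hok : pvPreOk s i =
            (if (i + 1 < (PySem.Str.len s : Int)
                && PySem.Str.pyGet? s (i + 1) == some '"') = true then true
             else pvPre_strOk ((PySem.Str.slice s (some i) none).toList.drop 1)) := by
          simp only [pvPreOk, hskip, hc]
          rfl
        by_cases hdq : (i + 1 < (PySem.Str.len s : Int)
            && PySem.Str.pyGet? s (i + 1) == some '"') = true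
        · have hdq' := hdq
          simp only [Bool.and_eq_true, decide_eq_true_eq, beq_iff_eq] at hdq'
          have hdq1 : i + 1 < ((s.length : Nat) : Int) := by simpa using hdq'.1
          have hdq2 : PySem.List.pyGet? s.toList (i + 1) = some '"' := by
            simpa using hdq'.2
          simp [pvA_ws, pvA_delim, pv_mk_qq, hdq1, hdq2]
        · rw [Bool.not_eq_true] at hdq
          rw [hdq] at hok
          simp only [Bool.false_eq_true, if_false] at hok
          have hstr : pvPre_strOk ((PySem.Str.slice s (some i) none).toList.drop 1) = true := by
            rw [← hok, h2]
          rw [pv_strOk_eq, pv_scan_eq] at hstr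
          rw [show (PySem.Str.slice s (some i) none).toList
              = PySem.List.slice s.toList (some i) none from by simp [PySem.Str.slice]] at hstr
          have hdqP : ¬(i + 1 < ((s.length : Nat) : Int) ∧
              PySem.List.pyGet? s.toList (i + 1) = some '"') := by
            simpa using hdq
          by_cases hcl : (PySem.List.slice s.toList (some i) none)[pvB_strLoop
              (PySem.List.slice s.toList (some i) none) 1]? = some '"'
          · simp [pvA_ws, pvA_delim, hdqP, pv_scan_eq, hcl, pv_mk_qq]
          · rw [if_neg hcl] at hstr
            simp at hstr
      · -- symbol branch
        have hdelim : pvA_delim c = false := by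
          simp [pvA_delim, hd1, hd2, hd3, hd4, hd5, hd6]
        have hstop : pvA_stop c = false := by
          simp only [Bool.not_eq_true] at hw
          simp [pvA_stop, pvA_delim, hw, hd1, hd2, hd3, hd4, hd5, hd6, hq, hcm]
        have hsym : pvA_sym s i = pvB_find s pvB_stop (i + 1) := by
          rw [pvA_sym, dif_pos ⟨hi, by rw [hc]; simp [hstop]⟩]
          exact pvA_sym_eq_find s (i + 1) (by omega) (by omega)
        have hle := pvB_find_le s pvB_stop (i + 1)
        simp only [Bool.not_eq_true] at hw
        simp [h0, hd1, hd2, hd3, hd4, hd5, hd6, hh, hcm, hq, hdelim, hw, hsym]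
        simpa using hle
  · rw [pvA_loop, dif_neg hi]
    have hfind : pvB_find s (fun c => !pvB_ws c) i = (PySem.Str.len s : Int) := by
      rw [pvB_find, dif_neg hi]
    simp only [V8jdyAH___alt, hfind, ge_iff_le, le_refl, if_true]
termination_by ((PySem.Str.len s : Int) - i).toNat
decreasing_by omega

-- ===== VERDICT (by name: the statement is the Claim_ definition above) =====
theorem V8jdyAH___spec : Claim_equal_V8jdyAH__ := by
  intro s i _hd hpre
  unfold Spec_V8jdyAH__ V8jdyAH__
  exact pv_main s i hpre.1 hpre.2
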